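-- pv_equiv track=rewrite | github.com/netpawn/UNI-Cpp-Python-Intro-Course | 4.1.py | max_char
-- ===== SOURCE A (Python) =====
-- def max_char(txt:str):
--     for char in txt:
--         if len(txt) == 1:
--             return char
--         else:
--             first = txt[0]
--             rest = txt[1:]
--             max_rest = max_char(rest)
--             if max_rest > first:
--                 return max_rest
--             else:
--                 return first
-- ===== SOURCE B (Python) =====
-- def max_char(txt: str):
--     if not txt:
--         return None
--     m = txt[0]
--     for c in txt:
--         if c > m:
--             m = c
--     return m
-- ===== Notes on version B (the rewrite author's own statement) =====
-- stated objective: simpler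
-- what changed: Replaced A's recursion over the tail (one recursive call per character, rebuilding suffix strings) with a single iterative left-to-right scan maintaining the running maximum.
-- outside the precondition, e.g. on max_char(''): A returns None, B returns None
import Mathlib
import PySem

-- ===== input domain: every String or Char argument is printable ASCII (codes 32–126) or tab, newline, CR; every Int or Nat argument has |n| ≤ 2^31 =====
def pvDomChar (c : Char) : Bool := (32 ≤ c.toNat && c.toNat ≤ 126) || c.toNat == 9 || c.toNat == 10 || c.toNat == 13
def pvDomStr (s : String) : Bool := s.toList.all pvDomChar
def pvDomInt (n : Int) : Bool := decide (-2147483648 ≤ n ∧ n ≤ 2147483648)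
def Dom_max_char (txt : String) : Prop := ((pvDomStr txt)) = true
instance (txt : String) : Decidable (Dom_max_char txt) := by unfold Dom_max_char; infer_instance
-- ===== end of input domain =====

-- B replaces A's recursion over the suffix with one iterative scan keeping the running maximum (simpler, single pass).
-- Python's 1-character strings are ported as Char; comparing them with Char's < is exact (code-point order, like Python's).

-- ===== PORT A =====
-- A's recursion, on head+tail (= A's nonempty string): len 1 → that char;
-- else max_rest = max_char(rest); return max_rest if max_rest > first else first.
def maxCharRecA (first : Char) : List Char → Char
  | [] => first
  | d :: rest =>
      let maxRest := maxCharRecA d rest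
      if first < maxRest then maxRest else first

def max_char (txt : String) : String :=
  match txt.toList with
  | [] => ""                         -- Python's `for` never runs: A returns None; excluded by Pre_
  | c :: cs => String.ofList [maxCharRecA c cs]

-- ===== PORT B =====
-- B: m = txt[0]; for c in txt: if c > m: m = c; return m.
def max_char_alt (txt : String) : String :=
  match txt.toList with
  | [] => ""                         -- B returns None; excluded by Pre_
  | c :: cs => String.ofList [(c :: cs).foldl (fun m x => if m < x then x else m) c]

-- ===== PRECONDITION & SPEC =====
-- Pre_ excludes only the empty string, on which Python A (and B) return None, not a string.
def Pre_max_char (txt : String) : Prop := txt ≠ ""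
instance (txt : String) : Decidable (Pre_max_char txt) := by unfold Pre_max_char; infer_instance
def pvWitness_max_char : String := "ab"
def Spec_max_char (txt : String) (out : String) : Prop := out = max_char_alt txt
instance (txt : String) (out : String) : Decidable (Spec_max_char txt out) := by unfold Spec_max_char; infer_instance

-- ===== CLAIM (what is proved, stated in full; the proofs are below) =====
def Claim_equal_max_char : Prop := ∀ (txt : String), Dom_max_char txt → Pre_max_char txt → Spec_max_char txt (max_char txt)

-- ===== LEMMAS AND PROOFS =====

theorem le_fold (b : Char) (l : List Char) :
    b ≤ List.foldl (fun m x => if m < x then x else m) b l := by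
  induction l generalizing b with
  | nil => exact le_refl b
  | cons d l ih =>
      simp only [List.foldl_cons]
      by_cases h : b < d
      · simp only [if_pos h]; exact le_of_lt (lt_of_lt_of_le h (ih d))
      · simp only [if_neg h]; exact ih b

theorem fold_ge (a b : Char) (l : List Char) (h : ¬ a < b) :
    List.foldl (fun m x => if m < x then x else m) a l
      = (if a < List.foldl (fun m x => if m < x then x else m) b l
         then List.foldl (fun m x => if m < x then x else m) b l else a) := by
  induction l generalizing a b with
  | nil => simp [if_neg h]
  | cons d l ih =>
      simp only [List.foldl_cons]
      by_cases had : a < d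
      · have hbd : b < d := lt_of_le_of_lt (le_of_not_gt h) had
        simp only [if_pos had, if_pos hbd]
        have : a < List.foldl (fun m x => if m < x then x else m) d l :=
          lt_of_lt_of_le had (le_fold d l)
        simp [if_pos this]
      · simp only [if_neg had]
        by_cases hbd : b < d
        · simp only [if_pos hbd]; exact ih a d had
        · simp only [if_neg hbd]; exact ih a b h

theorem fold_step (a b : Char) (l : List Char) :
    List.foldl (fun m x => if m < x then x else m) (if a < b then b else a) l
      = (if a < List.foldl (fun m x => if m < x then x else m) b l
         then List.foldl (fun m x => if m < x then x else m) b l else a) := by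
  by_cases hab : a < b
  · simp only [if_pos hab]
    have : a < List.foldl (fun m x => if m < x then x else m) b l :=
      lt_of_lt_of_le hab (le_fold b l)
    simp [if_pos this]
  · simp only [if_neg hab]
    exact fold_ge a b l hab

theorem maxCharRecA_eq_foldl (c : Char) (cs : List Char) :
    maxCharRecA c cs = List.foldl (fun m x => if m < x then x else m) c cs := by
  induction cs generalizing c with
  | nil => rfl
  | cons d ds ih =>
      simp only [maxCharRecA, ih, List.foldl_cons]
      exact (fold_step c d ds).symm

-- ===== VERDICT (by name: the statement is the Claim_ definition above) =====
theorem max_char_spec : Claim_equal_max_char := by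
  intro txt _ _
  unfold Spec_max_char max_char max_char_alt
  cases hl : txt.toList with
  | nil => rfl
  | cons c cs =>
      simp only [List.foldl_cons, maxCharRecA_eq_foldl, if_neg (lt_irrefl c)]
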